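-- pv_equiv track=rewrite | github.com/nhaar/DiceRoll-Statistics | DiceRoll.py | DistributionSum
-- ===== SOURCE A (Python) =====
-- def DistributionSum(dist1,dist2): #Sums two different distribution, and returns the sum of them
--     newdist = {}
--     for z in range(min(dist1)+min(dist2),max(dist1)+max(dist2)+1):
--         total = 0
--         for y in range(100):
--             if y in dist1 and (z-y) in dist2:
--                 total += dist1[y] * dist2[z-y]
--         newdist[z] = total
--     return newdist
-- ===== SOURCE B (Python) =====
-- def DistributionSum(dist1, dist2):
--     # Sparse accumulation: one pass over the actual key pairs builds a counter of
--     # pair sums; the output range is then read out of it (A instead rescans 100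
--     # candidate summands per output bucket; A's [0,100) window on dist1 keys is kept).
--     acc = {}
--     for y, p in dist1.items():
--         if 0 <= y < 100:
--             for x, q in dist2.items():
--                 acc[y + x] = acc.get(y + x, 0) + p * q
--     lo = min(dist1) + min(dist2)
--     hi = max(dist1) + max(dist2)
--     return {z: acc.get(z, 0) for z in range(lo, hi + 1)}
-- ===== Notes on version B (the rewrite author's own statement) =====
-- stated objective: faster
-- what changed: A recomputes each output bucket by scanning 100 candidate summands with dict membership tests; B makes one pass over the actual key pairs of the two dicts, accumulating products into a sparse counter keyed by the sum, and then reads the output range straight out of the counter.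
import Mathlib
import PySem

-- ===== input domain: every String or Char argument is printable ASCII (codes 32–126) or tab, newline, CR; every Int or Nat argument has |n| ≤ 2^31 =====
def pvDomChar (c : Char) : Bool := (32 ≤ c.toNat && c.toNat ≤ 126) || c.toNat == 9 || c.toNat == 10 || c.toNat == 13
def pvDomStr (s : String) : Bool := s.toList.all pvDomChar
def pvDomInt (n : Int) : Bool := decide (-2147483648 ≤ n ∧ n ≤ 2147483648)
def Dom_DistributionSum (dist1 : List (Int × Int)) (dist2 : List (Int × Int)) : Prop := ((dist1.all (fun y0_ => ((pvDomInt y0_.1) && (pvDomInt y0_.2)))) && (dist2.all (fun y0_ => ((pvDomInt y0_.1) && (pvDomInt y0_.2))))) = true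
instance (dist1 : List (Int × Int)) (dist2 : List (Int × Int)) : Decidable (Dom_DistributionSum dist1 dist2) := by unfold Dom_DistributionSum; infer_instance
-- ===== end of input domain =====

-- B replaces A's per-bucket scan of 100 candidate summands by one pass over the actual
-- key pairs into a sparse counter of sums, then reads the output range out of the counter
-- (A's [0,100) window on dist1 keys is kept).

-- ===== PORT A =====
-- dicts are passed as association lists; both ports rebuild the Python dict with Dict.ofList
def DistributionSum (dist1 : List (Int × Int)) (dist2 : List (Int × Int)) : List (Int × Int) :=
  let d1 := PySem.Dict.ofList dist1
  let d2 := PySem.Dict.ofList dist2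
  -- min(dist)/max(dist) on a Python dict range over its keys; Pre_ excludes empty dicts,
  -- where Python raises ValueError (the .getD 0 is never reached under Pre_)
  let lo := (PySem.List.min? d1.keys id).getD 0 + (PySem.List.min? d2.keys id).getD 0
  let hi := (PySem.List.max? d1.keys id).getD 0 + (PySem.List.max? d2.keys id).getD 0
  let nd := (PySem.List.pyRange lo (hi + 1) 1).foldl (fun nd z =>
      nd.insert z ((PySem.List.pyRange 0 100 1).foldl (fun total y =>
        if d1.contains y && d2.contains (z - y) then
          -- dist1[y] * dist2[z-y]: both keys are present under the guard, so getD is exact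
          total + d1.getD y 0 * d2.getD (z - y) 0
        else total) 0)) PySem.Dict.empty
  nd.items

-- ===== PORT B =====
def DistributionSum_alt (dist1 : List (Int × Int)) (dist2 : List (Int × Int)) : List (Int × Int) :=
  let d1 := PySem.Dict.ofList dist1
  let d2 := PySem.Dict.ofList dist2
  -- acc[y+x] = acc.get(y+x, 0) + p*q over the item pairs
  let acc := d1.items.foldl (fun acc yp =>
      if 0 ≤ yp.1 ∧ yp.1 < 100 then
        d2.items.foldl (fun acc xq =>
          acc.insert (yp.1 + xq.1) (acc.getD (yp.1 + xq.1) 0 + yp.2 * xq.2)) acc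
      else acc) PySem.Dict.empty
  let lo := (PySem.List.min? d1.keys id).getD 0 + (PySem.List.min? d2.keys id).getD 0
  let hi := (PySem.List.max? d1.keys id).getD 0 + (PySem.List.max? d2.keys id).getD 0
  -- {z: acc.get(z, 0) for z in range(lo, hi+1)}
  ((PySem.List.pyRange lo (hi + 1) 1).foldl
      (fun nd z => nd.insert z (acc.getD z 0)) PySem.Dict.empty).items

-- ===== PRECONDITION & SPEC =====
-- Pre_ excludes empty dicts: min()/max() of an empty dict raises ValueError in A (and in B).
def Pre_DistributionSum (dist1 : List (Int × Int)) (dist2 : List (Int × Int)) : Prop :=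
  dist1 ≠ [] ∧ dist2 ≠ []
instance (dist1 : List (Int × Int)) (dist2 : List (Int × Int)) : Decidable (Pre_DistributionSum dist1 dist2) := by unfold Pre_DistributionSum; infer_instance
def pvWitness_DistributionSum : (List (Int × Int)) × (List (Int × Int)) :=
  ([(1, 1), (2, 3)], [(1, 2), (3, 1)])
def Spec_DistributionSum (dist1 : List (Int × Int)) (dist2 : List (Int × Int)) (out : List (Int × Int)) : Prop := out = DistributionSum_alt dist1 dist2
instance (dist1 : List (Int × Int)) (dist2 : List (Int × Int)) (out : List (Int × Int)) : Decidable (Spec_DistributionSum dist1 dist2 out) := by unfold Spec_DistributionSum; infer_instance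

-- ===== CLAIM (what is proved, stated in full; the proofs are below) =====
def Claim_equal_DistributionSum : Prop := ∀ (dist1 : List (Int × Int)) (dist2 : List (Int × Int)), Dom_DistributionSum dist1 dist2 → Pre_DistributionSum dist1 dist2 → Spec_DistributionSum dist1 dist2 (DistributionSum dist1 dist2)

-- ===== LEMMAS AND PROOFS =====

-- the contribution of one dist1 item (y, p) to bucket w, summed over dist2's items
def pvSB2 (y p w : Int) (m : List (Int × Int)) : Int :=
  (m.map (fun xq => if y + xq.1 = w then p * xq.2 else 0)).sum

-- the total contribution of dist1's items to bucket w (only items with 0 ≤ y < 100 contribute)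
def pvSB1 (w : Int) (l m : List (Int × Int)) : Int :=
  (l.map (fun yp => if 0 ≤ yp.1 ∧ yp.1 < 100 then pvSB2 yp.1 yp.2 w m else 0)).sum

-- ===== both results are the output range mapped through a per-bucket value =====

theorem pv_range_items (lo hi : Int) (f : Int → Int) :
    ((PySem.List.pyRange lo (hi + 1) 1).foldl (fun nd z => nd.insert z (f z))
        PySem.Dict.empty).items
    = (PySem.List.pyRange lo (hi + 1) 1).map (fun z => (z, f z)) := by
  have h := PySem.Dict.items_foldl_insert_fresh (PySem.List.pyRange lo (hi + 1) 1)
    (fun z => z) f PySem.Dict.empty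
    (fun a _ => PySem.Dict.contains_empty a)
    (by simpa using PySem.List.nodup_pyRange_one lo (hi + 1))
  simpa using h

-- turn A's accumulating inner loop into a list sum
theorem pv_foldl_if_add (L : List Int) (c : Int → Bool) (g : Int → Int) :
    L.foldl (fun t y => if c y then t + g y else t) 0
    = (L.map (fun y => if c y then g y else 0)).sum := by
  have hf : (fun (t : Int) y => if c y then t + g y else t)
      = fun t y => t + (if c y then g y else 0) := by
    funext t y; split <;> simp
  rw [hf, PySem.List.foldl_add, zero_add]

-- ===== sum reindexing: range-with-membership-test sum = sum over the items =====

theorem pv_sum_if_eq (L : List Int) (hL : L.Nodup) (k c : Int) (g : Int → Int) (hg : g k = 0) :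
    (L.map (fun y => if y = k then c else g y)).sum
    = (if k ∈ L then c else 0) + (L.map g).sum := by
  induction L with
  | nil => simp
  | cons a L ih =>
    obtain ⟨ha, hL⟩ := List.nodup_cons.mp hL
    by_cases hak : a = k
    · subst hak
      have : (L.map (fun y => if y = a then c else g y)) = L.map g := by
        apply List.map_congr_left
        intro y hyL
        have : y ≠ a := fun h => ha (h ▸ hyL)
        simp [this]
      simp [this, hg]
    · have hkL : (k ∈ a :: L) ↔ k ∈ L := by
        constructor
        · intro h; rcases List.mem_cons.mp h with h | h
          · exact absurd h.symm hak
          · exact h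
        · exact List.mem_cons_of_mem a
      simp only [List.map_cons, List.sum_cons, ih hL]
      rw [if_neg hak]
      by_cases hk : k ∈ L
      · simp [hkL, hk]; ring
      · rw [if_neg hk, if_neg (fun h => hk (hkL.mp h))]; ring

theorem pv_reindex (a b : Int) (m : List (Int × Int)) (hn : (m.map Prod.fst).Nodup)
    (F : Int → Int → Int) :
    ((PySem.List.pyRange a b 1).map (fun y =>
        if (PySem.Dict.mk m).contains y then F y ((PySem.Dict.mk m).getD y 0) else 0)).sum
    = (m.map (fun yp => if a ≤ yp.1 ∧ yp.1 < b then F yp.1 yp.2 else 0)).sum := by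
  induction m with
  | nil => simp [PySem.Dict.contains]
  | cons kv m ih =>
    obtain ⟨k, v⟩ := kv
    simp only [List.map_cons] at hn
    obtain ⟨hk, hnm⟩ := List.nodup_cons.mp hn
    have hstep : ∀ y, (if (PySem.Dict.mk ((k, v) :: m)).contains y
          then F y ((PySem.Dict.mk ((k, v) :: m)).getD y 0) else 0)
        = (if y = k then F k v
           else if (PySem.Dict.mk m).contains y then F y ((PySem.Dict.mk m).getD y 0) else 0) := by
      intro y
      by_cases hyk : y = k
      · subst hyk
        simp [PySem.Dict.contains, PySem.Dict.getD, PySem.Dict.get?_mk_cons]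
      · have hby : (k == y) = false := by simp [Ne.symm hyk]
        simp only [PySem.Dict.contains, PySem.Dict.getD, PySem.Dict.get?_mk_cons,
          List.any_cons, hby, Bool.false_or, if_neg hyk]
        simp
    rw [List.map_congr_left (fun y _ => hstep y)]
    have hgk : (if (PySem.Dict.mk m).contains k then F k ((PySem.Dict.mk m).getD k 0) else 0) = 0 := by
      have : (PySem.Dict.mk m).contains k = false := by
        simp only [PySem.Dict.contains, List.any_eq_false]
        intro p hp
        simp only [beq_iff_eq]
        intro h
        exact hk (h ▸ List.mem_map_of_mem hp)
      simp [this]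
    rw [pv_sum_if_eq _ (PySem.List.nodup_pyRange_one a b) k (F k v) _ hgk, ih hnm]
    simp only [List.map_cons, List.sum_cons]
    congr 1
    by_cases hmem : a ≤ k ∧ k < b
    · rw [if_pos (PySem.List.mem_pyRange_one.mpr hmem), if_pos hmem]
    · rw [if_neg (fun h => hmem (PySem.List.mem_pyRange_one.mp h)), if_neg hmem]

-- pvSB2 over a nodup-keyed item list is a single guarded lookup
theorem pv_SB2_lookup (m : List (Int × Int)) (hn : (m.map Prod.fst).Nodup) (y p w : Int) :
    pvSB2 y p w m
    = (if (PySem.Dict.mk m).contains (w - y) then p * (PySem.Dict.mk m).getD (w - y) 0 else 0) := by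
  induction m with
  | nil => simp [pvSB2, PySem.Dict.contains]
  | cons xq m ih =>
    obtain ⟨x, q⟩ := xq
    simp only [List.map_cons] at hn
    obtain ⟨hx, hnm⟩ := List.nodup_cons.mp hn
    have hsum : pvSB2 y p w ((x, q) :: m)
        = (if y + x = w then p * q else 0) + pvSB2 y p w m := by
      simp [pvSB2]
    by_cases hxw : x = w - y
    · subst hxw
      have h1 : y + (w - y) = w := by ring
      have hc : (PySem.Dict.mk m).contains (w - y) = false := by
        simp only [PySem.Dict.contains, List.any_eq_false]
        intro pr hpr
        simp only [beq_iff_eq]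
        intro h
        exact hx (h ▸ List.mem_map_of_mem hpr)
      rw [hsum, if_pos h1, ih hnm, if_neg (by simp [hc])]
      simp [PySem.Dict.contains, PySem.Dict.getD, PySem.Dict.get?_mk_cons]
    · have h1 : ¬ (y + x = w) := fun h => hxw (by omega)
      have hbx : (x == w - y) = false := by simp [hxw]
      rw [hsum, if_neg h1, ih hnm, zero_add]
      have hcc : (PySem.Dict.mk ((x, q) :: m)).contains (w - y)
          = (PySem.Dict.mk m).contains (w - y) := by
        simp only [PySem.Dict.contains, List.any_cons]
        rw [hbx, Bool.false_or]
      have hgg : (PySem.Dict.mk ((x, q) :: m)).getD (w - y) 0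
          = (PySem.Dict.mk m).getD (w - y) 0 := by
        simp only [PySem.Dict.getD, PySem.Dict.get?_mk_cons]
        rw [hbx]
        simp
      rw [hcc, hgg]

-- ===== B side: the counter holds exactly pvSB1 at every key =====

theorem pv_acc_inner (m : List (Int × Int)) (y p : Int) (acc : PySem.Dict Int Int) (w : Int) :
    (m.foldl (fun acc xq =>
        acc.insert (y + xq.1) (acc.getD (y + xq.1) 0 + p * xq.2)) acc).getD w 0
    = acc.getD w 0 + pvSB2 y p w m := by
  induction m generalizing acc with
  | nil => simp [pvSB2]
  | cons xq m ih =>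
    simp only [List.foldl_cons]
    rw [ih]
    have hsum : pvSB2 y p w (xq :: m)
        = (if y + xq.1 = w then p * xq.2 else 0) + pvSB2 y p w m := by
      simp [pvSB2]
    rw [PySem.Dict.getD_insert, hsum]
    by_cases hw : w = y + xq.1
    · rw [if_pos hw, if_pos (show y + xq.1 = w by omega), hw]; ring
    · rw [if_neg hw, if_neg (show ¬ (y + xq.1 = w) by omega)]; ring

theorem pv_acc_outer (l m : List (Int × Int)) (acc : PySem.Dict Int Int) (w : Int) :
    (l.foldl (fun acc yp =>
        if 0 ≤ yp.1 ∧ yp.1 < 100 then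
          m.foldl (fun acc xq =>
            acc.insert (yp.1 + xq.1) (acc.getD (yp.1 + xq.1) 0 + yp.2 * xq.2)) acc
        else acc) acc).getD w 0
    = acc.getD w 0 + pvSB1 w l m := by
  induction l generalizing acc with
  | nil => simp [pvSB1]
  | cons yp l ih =>
    simp only [List.foldl_cons]
    rw [ih]
    have hsum : pvSB1 w (yp :: l) m
        = (if 0 ≤ yp.1 ∧ yp.1 < 100 then pvSB2 yp.1 yp.2 w m else 0) + pvSB1 w l m := by
      simp [pvSB1]
    rw [hsum]
    split
    · rw [pv_acc_inner]; ring
    · ring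

-- ===== A side: the inner loop computes pvSB1 pointwise =====

theorem pv_pointwise (d1 d2 : PySem.Dict Int Int) (h1 : d1.keys.Nodup) (h2 : d2.keys.Nodup)
    (z : Int) :
    (PySem.List.pyRange 0 100 1).foldl (fun total y =>
        if d1.contains y && d2.contains (z - y) then
          total + d1.getD y 0 * d2.getD (z - y) 0
        else total) 0
    = pvSB1 z d1.items d2.items := by
  obtain ⟨m1⟩ := d1
  have h1' : (m1.map Prod.fst).Nodup := h1
  rw [pv_foldl_if_add]
  have hstep : ∀ y, (if (PySem.Dict.mk m1).contains y && d2.contains (z - y)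
        then (PySem.Dict.mk m1).getD y 0 * d2.getD (z - y) 0 else 0)
      = (if (PySem.Dict.mk m1).contains y
         then (fun y p => if d2.contains (z - y) then p * d2.getD (z - y) 0 else 0) y
           ((PySem.Dict.mk m1).getD y 0)
         else 0) := by
    intro y
    by_cases hc1 : (PySem.Dict.mk m1).contains y
    · by_cases hc2 : d2.contains (z - y) <;> simp [hc1, hc2, mul_comm]
    · simp [Bool.eq_false_iff.mpr hc1]
  rw [List.map_congr_left (fun y _ => hstep y)]
  rw [pv_reindex 0 100 m1 h1'
    (fun y p => if d2.contains (z - y) then p * d2.getD (z - y) 0 else 0)]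
  simp only [pvSB1]
  apply congrArg List.sum
  apply List.map_congr_left
  intro yp _
  by_cases hy : 0 ≤ yp.1 ∧ yp.1 < 100
  · rw [if_pos hy, if_pos hy]
    obtain ⟨m2⟩ := d2
    rw [pv_SB2_lookup m2 h2 yp.1 yp.2 z]
  · rw [if_neg hy, if_neg hy]

-- ===== VERDICT (by name: the statement is the Claim_ definition above) =====
theorem DistributionSum_spec : Claim_equal_DistributionSum := by
  intro dist1 dist2 _ _
  show DistributionSum dist1 dist2 = DistributionSum_alt dist1 dist2
  have h1 := PySem.Dict.nodup_keys_ofList (κ := Int) (ν := Int) dist1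
  have h2 := PySem.Dict.nodup_keys_ofList (κ := Int) (ν := Int) dist2
  unfold DistributionSum DistributionSum_alt
  rw [pv_range_items, pv_range_items]
  apply List.map_congr_left
  intro z _
  have hacc := pv_acc_outer (PySem.Dict.ofList dist1).items (PySem.Dict.ofList dist2).items
    PySem.Dict.empty z
  rw [hacc]
  rw [pv_pointwise (PySem.Dict.ofList dist1) (PySem.Dict.ofList dist2) h1 h2 z]
  simp [PySem.Dict.getD, PySem.Dict.get?_empty]
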